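-- pv_equiv track=rewrite | github.com/tmoertel/practice | google-code-jam/2009/qual-A-alien-language/alien_language.py | solve
-- ===== SOURCE A (Python) =====
-- def solve(lang, pats):
--     tree = prefix_tree(lang)
--     for pat in pats:
--         matches = 0
--         stack = [(parse_pattern(pat), tree)]
--         while stack:
--             tokens, root = stack.pop()
--             if not tokens:
--                 matches += 1
--             else:
--                 lead_token, remaining_tokens = tokens[0], tokens[1:]
--                 for c in lead_token:
--                     if c in root:
--                         stack.append((remaining_tokens, root[c]))
--         yield matches
--
-- def parse_pattern(pat):
--     tokens = []
--     while pat: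
--         if pat[0] == "(":
--             i = pat.index(")")
--             tokens.append(pat[1:i])
--             pat = pat[i + 1 :]
--         else:
--             tokens.append(pat[0])
--             pat = pat[1:]
--     return tokens
--
-- def prefix_tree(words):
--     tree = {}
--     for word in words:
--         root = tree
--         for c in word:
--             root = root.setdefault(c, {})
--     return tree
-- ===== SOURCE B (Python) =====
-- def parse_pattern(pat):
--     tokens = []
--     while pat:
--         if pat[0] == "(":
--             i = pat.index(")")
--             tokens.append(pat[1:i])
--             pat = pat[i + 1 :]
--         else:
--             tokens.append(pat[0])
--             pat = pat[1:]
--     return tokens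
--
-- def solve(lang, pats):
--     prefs = {w[:i] for w in lang for i in range(len(w) + 1)}
--     prefs.add("")
--     for pat in pats:
--         frontier = [""]
--         for tok in parse_pattern(pat):
--             frontier = [p + c for p in frontier for c in tok if p + c in prefs]
--         yield len(frontier)
-- ===== Notes on version B (the rewrite author's own statement) =====
-- stated objective: alternative
-- what changed: B drops the prefix trie and its explicit DFS stack entirely: it builds one set of all word prefixes, and per pattern runs a breadth-first frontier of candidate prefixes (a list comprehension per token, keeping multiplicity), yielding the frontier length instead of incrementing a counter at trie leaves.
import Mathlib
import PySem

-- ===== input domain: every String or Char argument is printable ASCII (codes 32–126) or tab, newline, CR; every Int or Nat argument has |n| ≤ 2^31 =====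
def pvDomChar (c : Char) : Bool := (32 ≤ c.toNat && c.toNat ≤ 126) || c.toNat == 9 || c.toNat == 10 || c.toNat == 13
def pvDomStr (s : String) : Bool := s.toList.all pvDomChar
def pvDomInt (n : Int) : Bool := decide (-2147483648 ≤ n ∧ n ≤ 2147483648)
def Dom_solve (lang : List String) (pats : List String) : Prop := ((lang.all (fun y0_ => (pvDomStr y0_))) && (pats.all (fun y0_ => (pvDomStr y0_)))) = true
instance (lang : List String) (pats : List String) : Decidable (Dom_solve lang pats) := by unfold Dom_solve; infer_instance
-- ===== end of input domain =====

-- B replaces A's prefix trie + explicit DFS stack by one set of all word prefixes and a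
-- per-pattern breadth-first frontier list; objective: alternative (different data structure
-- and traversal, similar cost).

-- ===== PORT A =====

-- parse_pattern. 'pat.index(")")' raises ValueError when absent -> none. With pat[0] = '(',
-- 'pat.index(")")' equals 1 + (first index of ')' in the tail), so token pat[1:i] = rest.take j
-- and pat[i+1:] = rest.drop (j+1); exact on every input.
def parsePattern : List Char → Option (List (List Char))
  | [] => some []
  | c :: rest =>
    if c = '(' then
      match PySem.List.index? rest ')' with
      | none => none                       -- ValueError
      | some j =>
        match parsePattern (rest.drop (j + 1)) with
        | none => none
        | some ts => some (rest.take j :: ts)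
    else
      match parsePattern rest with
      | none => none
      | some ts => some ([c] :: ts)
  termination_by l => l.length
  decreasing_by
  all_goals simp

-- prefix_tree: nested dicts become a mutual inductive (child list in insertion order,
-- setdefault appends a fresh child at the end).
mutual
inductive Trie : Type where
  | mk : TrieL → Trie
inductive TrieL : Type where
  | nil : TrieL
  | cons : Char → Trie → TrieL → TrieL
end

def lookupT : TrieL → Char → Option Trie
  | .nil, _ => none
  | .cons d t r, c => if d = c then some t else lookupT r c

def setChild : TrieL → Char → Trie → TrieL
  | .nil, c, t => .cons c t .nil
  | .cons d u r, c, t => if d = c then .cons d t r else .cons d u (setChild r c t)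

-- root = root.setdefault(c, {}) iterated over the word
def insertW : Trie → List Char → Trie
  | t, [] => t
  | .mk l, c :: cs => .mk (setChild l c (insertW ((lookupT l c).getD (.mk .nil)) cs))

def prefixTree (words : List String) : Trie :=
  words.foldl (fun t w => insertW t w.toList) (.mk .nil)

-- termination measure for the DFS stack loop
def wtoks (toks : List (List Char)) : Nat := toks.foldr (fun t acc => (t.length + 1) * acc) 1

def wstack (s : List (List (List Char) × Trie)) : Nat := (s.map (fun e => wtoks e.1)).sum

theorem wtoks_pos (toks : List (List Char)) : 0 < wtoks toks := by
  induction toks with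
  | nil => exact Nat.one_pos
  | cons t ts ih =>
    have h : wtoks (t :: ts) = (t.length + 1) * wtoks ts := rfl
    rw [h]
    exact Nat.mul_pos (Nat.succ_pos _) ih

theorem wstack_cons (e : List (List Char) × Trie) (s : List (List (List Char) × Trie)) :
    wstack (e :: s) = wtoks e.1 + wstack s := rfl

theorem wstack_append (a b : List (List (List Char) × Trie)) :
    wstack (a ++ b) = wstack a + wstack b := by
  induction a with
  | nil => exact (Nat.zero_add _).symm
  | cons e a ih =>
    rw [List.cons_append, wstack_cons, wstack_cons, ih, Nat.add_assoc]

theorem wstack_reverse (a : List (List (List Char) × Trie)) :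
    wstack a.reverse = wstack a := by
  unfold wstack
  rw [List.map_reverse, List.sum_reverse]

theorem wstack_filterMap_le (tk : List Char) (ts : List (List Char)) (g : Char → Option Trie) :
    wstack (tk.filterMap fun c => (g c).map fun u => (ts, u)) ≤ tk.length * wtoks ts := by
  induction tk with
  | nil => exact Nat.zero_le _
  | cons c tk ih =>
    cases h : g c with
    | none =>
      rw [List.filterMap_cons_none (by rw [h]; rfl)]
      exact Nat.le_trans ih (Nat.mul_le_mul_right _ (Nat.le_succ _))
    | some u =>
      rw [List.filterMap_cons_some (by rw [h]; rfl), wstack_cons]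
      show wtoks ts + wstack (tk.filterMap fun c => (g c).map fun u => (ts, u))
          ≤ (tk.length + 1) * wtoks ts
      rw [Nat.succ_mul, Nat.add_comm (tk.length * wtoks ts) (wtoks ts)]
      exact Nat.add_le_add_left ih _

-- the entries pushed by 'for c in lead_token: if c in root: stack.append(...)'
def pushes (l : TrieL) (ts : List (List Char)) (tk : List Char) :
    List (List (List Char) × Trie) :=
  tk.filterMap fun c => (lookupT l c).map fun u => (ts, u)

-- the while-stack loop of solve (stack top = list head; Python pushes the lead token's
-- characters in order and pops LIFO, hence the reverse before pushing)
def loopA : List (List (List Char) × Trie) → Int → Int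
  | [], m => m
  | (tokens, t) :: stk, m =>
    match tokens with
    | [] => loopA stk (m + 1)
    | tk :: ts =>
      match t with
      | .mk l => loopA ((pushes l ts tk).reverse ++ stk) m
  termination_by s _ => wstack s
  decreasing_by
  · rw [wstack_cons]
    rw [Nat.add_comm]
    exact Nat.lt_succ_self _
  · rw [wstack_append, wstack_reverse, wstack_cons]
    refine Nat.add_lt_add_right ?_ (wstack stk)
    refine Nat.lt_of_le_of_lt (wstack_filterMap_le tk ts _) ?_
    have h : wtoks (tk :: ts) = tk.length * wtoks ts + wtoks ts := Nat.succ_mul _ _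
    rw [h]
    exact Nat.lt_add_of_pos_right (wtoks_pos ts)

def solve (lang : List String) (pats : List String) : List Int :=
  let tree := prefixTree lang
  pats.map fun pat =>
    match parsePattern pat.toList with
    | none => 0          -- Python raises ValueError here; excluded by Pre_solve
    | some toks => loopA [(toks, tree)] 0

-- ===== PORT B =====

-- prefs = {w[:i] for w in lang for i in range(len(w) + 1)}; prefs.add("")
def prefsOf (lang : List String) : List (List Char) :=
  PySem.Set.add
    (PySem.Set.ofList (lang.flatMap fun w =>
      (List.range (w.toList.length + 1)).map fun i => w.toList.take i))
    []

-- frontier = [p + c for p in frontier for c in tok if p + c in prefs]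
def stepB (prefs : List (List Char)) (F : List (List Char)) (tk : List Char) :
    List (List Char) :=
  F.flatMap fun p => tk.filterMap fun c =>
    if (p ++ [c]) ∈ prefs then some (p ++ [c]) else none

def solve_alt (lang : List String) (pats : List String) : List Int :=
  let prefs := prefsOf lang
  pats.map fun pat =>
    match parsePattern pat.toList with
    | none => 0          -- ValueError in Python; excluded by Pre_solve
    | some toks => ((toks.foldl (stepB prefs) [[]]).length : Int)

-- ===== PRECONDITION & SPEC =====

-- every '(' is followed by a later ')' (exactly the patterns parse_pattern accepts)
def goodPat : List Char → Bool
  | [] => true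
  | c :: r => (c != '(' || r.contains ')') && goodPat r

-- Pre_solve excludes exactly the inputs on which A raises ValueError (a '(' with no later ')')
def Pre_solve (lang : List String) (pats : List String) : Prop :=
  ∀ pat ∈ pats, goodPat pat.toList = true
instance (lang : List String) (pats : List String) : Decidable (Pre_solve lang pats) := by
  unfold Pre_solve; infer_instance

def pvWitness_solve : List String × List String := (["ab", "b"], ["a(ab)", "(ab)b"])

def Spec_solve (lang : List String) (pats : List String) (out : List Int) : Prop :=
  out = solve_alt lang pats
instance (lang : List String) (pats : List String) (out : List Int) :
    Decidable (Spec_solve lang pats out) := by unfold Spec_solve; infer_instance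

-- ===== CLAIM (what is proved, stated in full; the proofs are below) =====
def Claim_equal_solve : Prop := ∀ (lang : List String) (pats : List String), Dom_solve lang pats → Pre_solve lang pats → Spec_solve lang pats (solve lang pats)

-- ===== LEMMAS AND PROOFS =====

-- `w` with first char `c` removed, Python's w[1:] for words starting with c
def selC (c : Char) : List Char → Option (List Char)
  | [] => none
  | d :: r => if d = c then some r else none

def tailsW (ws : List (List Char)) (c : Char) : List (List Char) := ws.filterMap (selC c)

def trieOfC (ws : List (List Char)) : Trie := ws.foldl insertW (Trie.mk .nil)

def chl : Trie → TrieL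
  | .mk l => l

-- recursive reading of A's DFS count from one stack entry
def cnt : List (List Char) → Trie → Int
  | [], _ => 1
  | tk :: ts, .mk l => (tk.map fun c => match lookupT l c with | some u => cnt ts u | none => 0).sum

theorem mem_tailsW {ws : List (List Char)} {c : Char} {w' : List Char} :
    w' ∈ tailsW ws c ↔ (c :: w') ∈ ws := by
  simp only [tailsW, List.mem_filterMap]
  constructor
  · rintro ⟨w, hw, hsel⟩
    cases w with
    | nil => simp [selC] at hsel
    | cons d r =>
      by_cases h : d = c
      · subst h; simp [selC] at hsel; subst hsel; exact hw
      · simp [selC, h] at hsel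
  · intro h; exact ⟨c :: w', h, by simp [selC]⟩

theorem cnt_pushes (l : TrieL) (ts : List (List Char)) (tk : List Char) :
    ((pushes l ts tk).map fun e => cnt e.1 e.2).sum = cnt (tk :: ts) (.mk l) := by
  show _ = (tk.map fun c => match lookupT l c with | some u => cnt ts u | none => 0).sum
  induction tk with
  | nil => simp [pushes]
  | cons c tk ih =>
    cases h : lookupT l c with
    | none => simpa [pushes, List.filterMap_cons, h] using ih
    | some u => simpa [pushes, List.filterMap_cons, h] using ih

theorem loopA_eq (s : List (List (List Char) × Trie)) (m : Int) :
    loopA s m = m + ((s.map fun e => cnt e.1 e.2).sum) := by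
  induction s, m using loopA.induct with
  | case1 m => simp [loopA]
  | case2 t stk m ih =>
    rw [loopA, ih]
    simp only [List.map_cons, List.sum_cons, cnt]
    ring
  | case3 stk m tk ts l ih =>
    rw [loopA, ih]
    rw [List.map_append, List.sum_append, List.map_reverse, List.sum_reverse, cnt_pushes]
    simp only [List.map_cons, List.sum_cons]

theorem lookupT_setChild : ∀ (l : TrieL) (c : Char) (t : Trie) (e : Char),
    lookupT (setChild l c t) e = if c = e then some t else lookupT l e
  | .nil, c, t, e => by
    simp [setChild, lookupT]
  | .cons d u r, c, t, e => by
    by_cases hdc : d = c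
    · subst hdc
      by_cases hde : d = e <;> simp [setChild, lookupT, hde]
    · by_cases hde : d = e
      · have hce : ¬ c = e := fun hh => hdc (hde.trans hh.symm)
        subst hde
        simp [setChild, lookupT, hdc, hce]
      · by_cases hce : c = e
        · subst hce
          simp [setChild, lookupT, hdc, hde, lookupT_setChild r c t c]
        · simp [setChild, lookupT, hdc, hde, hce, lookupT_setChild r c t e]

theorem lookup_foldl (ws : List (List Char)) (t : TrieL) (c : Char) :
    lookupT (chl (ws.foldl insertW (Trie.mk t))) c =
      match lookupT t c, tailsW ws c with
      | some u, us => some (us.foldl insertW u)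
      | none, [] => none
      | none, _ :: _ => some ((tailsW ws c).foldl insertW (Trie.mk .nil)) := by
  induction ws generalizing t with
  | nil =>
    cases h : lookupT t c with
    | none => simp [tailsW, chl, h]
    | some u => simp [tailsW, chl, h]
  | cons w ws ih =>
    cases w with
    | nil =>
      have h0 : tailsW ([] :: ws) c = tailsW ws c := by simp [tailsW, selC]
      simp only [List.foldl_cons, insertW, h0]
      exact ih t
    | cons d cs =>
      by_cases hd : d = c
      · have h0 : tailsW ((d :: cs) :: ws) c = cs :: tailsW ws c := by
          simp [tailsW, List.filterMap_cons, selC, hd]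
        simp only [List.foldl_cons, insertW, h0]
        rw [ih]
        rw [lookupT_setChild]
        subst hd
        rw [if_pos rfl]
        cases hlk : lookupT t d with
        | none => simp [hlk]
        | some u => simp [hlk]
      · have h0 : tailsW ((d :: cs) :: ws) c = tailsW ws c := by
          simp [tailsW, List.filterMap_cons, selC, hd]
        simp only [List.foldl_cons, insertW, h0]
        rw [ih]
        rw [lookupT_setChild]
        simp [hd]

theorem lookup_trieOfC (ws : List (List Char)) (c : Char) :
    lookupT (chl (trieOfC ws)) c =
      match tailsW ws c with
      | [] => none
      | _ :: _ => some (trieOfC (tailsW ws c)) := by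
  have h := lookup_foldl ws .nil c
  rw [trieOfC, h]
  cases htl : tailsW ws c <;> simp [htl, lookupT, trieOfC]

-- B-side structure lemmas
theorem stepB_append (prefs : List (List Char)) (F1 F2 : List (List Char)) (tk : List Char) :
    stepB prefs (F1 ++ F2) tk = stepB prefs F1 tk ++ stepB prefs F2 tk := by
  simp [stepB]

theorem foldl_stepB_append (prefs : List (List Char)) (toks : List (List Char))
    (F1 F2 : List (List Char)) :
    toks.foldl (stepB prefs) (F1 ++ F2) =
      toks.foldl (stepB prefs) F1 ++ toks.foldl (stepB prefs) F2 := by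
  induction toks generalizing F1 F2 with
  | nil => rfl
  | cons tk ts ih =>
    simp only [List.foldl_cons, stepB_append]
    exact ih _ _

theorem foldl_stepB_nil (prefs : List (List Char)) (toks : List (List Char)) :
    toks.foldl (stepB prefs) [] = [] := by
  induction toks with
  | nil => rfl
  | cons tk ts ih => simpa [stepB] using ih

theorem exists_prefix_single {c : Char} {W : List (List Char)} :
    (∃ w ∈ W, [c] <+: w) ↔ tailsW W c ≠ [] := by
  constructor
  · rintro ⟨w, hw, hpre⟩
    cases w with
    | nil => exact absurd (List.prefix_nil.mp hpre) (by simp)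
    | cons d r =>
      have hcd : c = d := (List.cons_prefix_cons.mp hpre).1
      subst hcd
      intro hnil
      have : r ∈ tailsW W c := mem_tailsW.mpr hw
      rw [hnil] at this
      exact absurd this (List.not_mem_nil)
  · intro hne
    cases htl : tailsW W c with
    | nil => exact absurd htl hne
    | cons u us =>
      have hu : u ∈ tailsW W c := htl ▸ List.mem_cons_self
      exact ⟨c :: u, mem_tailsW.mp hu, ⟨u, by simp⟩⟩

theorem inv_step {prefsL : List (List Char)} {p : List Char} {W : List (List Char)} {c : Char}
    (hInv : ∀ r : List Char, r ≠ [] → ((p ++ r) ∈ prefsL ↔ ∃ w ∈ W, r <+: w)) :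
    ∀ r : List Char, r ≠ [] →
      (((p ++ [c]) ++ r) ∈ prefsL ↔ ∃ w ∈ tailsW W c, r <+: w) := by
  intro r hr
  have h1 : (p ++ [c]) ++ r = p ++ (c :: r) := by simp
  rw [h1, hInv (c :: r) (by simp)]
  constructor
  · rintro ⟨w, hw, hpre⟩
    cases w with
    | nil => exact absurd (List.prefix_nil.mp hpre) (by simp)
    | cons d r' =>
      obtain ⟨hcd, hpre'⟩ := List.cons_prefix_cons.mp hpre
      subst hcd
      exact ⟨r', mem_tailsW.mpr hw, hpre'⟩
  · rintro ⟨w', hw', hpre⟩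
    exact ⟨c :: w', mem_tailsW.mp hw', List.cons_prefix_cons.mpr ⟨rfl, hpre⟩⟩

-- the heart: from one frontier prefix p whose sub-dictionary is W, B's frontier length
-- below p equals A's DFS count from the sub-trie of W
theorem keyL (prefsL : List (List Char)) :
    ∀ (toks : List (List Char)) (p : List Char) (W : List (List Char)),
      (∀ r : List Char, r ≠ [] → ((p ++ r) ∈ prefsL ↔ ∃ w ∈ W, r <+: w)) →
      ((toks.foldl (stepB prefsL) [p]).length : Int) = cnt toks (trieOfC W) := by
  intro toks
  induction toks with
  | nil =>
    intro p W _
    simp [cnt]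
  | cons tk ts ih =>
    intro p W hInv
    rw [List.foldl_cons]
    have hcnt : cnt (tk :: ts) (trieOfC W) =
        (tk.map fun c => match lookupT (chl (trieOfC W)) c with
          | some u => cnt ts u | none => 0).sum := by
      cases htr : trieOfC W with
      | mk l => simp [cnt, chl]
    rw [hcnt]
    have hstep : stepB prefsL [p] tk =
        tk.filterMap fun c => if (p ++ [c]) ∈ prefsL then some (p ++ [c]) else none := by
      simp [stepB]
    rw [hstep]
    clear hcnt hstep
    induction tk with
    | nil => simp [foldl_stepB_nil]
    | cons c tk' ihtk =>
      rw [List.filterMap_cons, List.map_cons, List.sum_cons]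
      by_cases hc : (p ++ [c]) ∈ prefsL
      · have htl : tailsW W c ≠ [] := exists_prefix_single.mp ((hInv [c] (by simp)).mp hc)
        have hlk : lookupT (chl (trieOfC W)) c = some (trieOfC (tailsW W c)) := by
          rw [lookup_trieOfC]
          cases htl2 : tailsW W c with
          | nil => exact absurd htl2 htl
          | cons u us => simp
        simp only [hc, if_pos, hlk]
        have hsplit : ts.foldl (stepB prefsL)
            ((p ++ [c]) :: tk'.filterMap fun c =>
              if (p ++ [c]) ∈ prefsL then some (p ++ [c]) else none) =
            ts.foldl (stepB prefsL) [p ++ [c]] ++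
              ts.foldl (stepB prefsL)
                (tk'.filterMap fun c =>
                  if (p ++ [c]) ∈ prefsL then some (p ++ [c]) else none) := by
          rw [← foldl_stepB_append]
          rfl
        rw [hsplit, List.length_append]
        push_cast
        rw [ihtk, ih (p ++ [c]) (tailsW W c) (inv_step hInv)]
      · have htl : tailsW W c = [] := by
          by_contra hne
          exact hc ((hInv [c] (by simp)).mpr (exists_prefix_single.mpr hne))
        have hlk : lookupT (chl (trieOfC W)) c = none := by
          rw [lookup_trieOfC, htl]
        simp only [hc, if_neg, not_false_iff, hlk]
        rw [ihtk]
        ring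

-- membership in B's prefix set: a nonempty list is in prefs iff it is a prefix of some word
theorem mem_prefsOf (lang : List String) (r : List Char) (hr : r ≠ []) :
    r ∈ prefsOf lang ↔ ∃ w ∈ lang.map String.toList, r <+: w := by
  unfold prefsOf
  rw [PySem.Set.mem_add, PySem.Set.mem_ofList]
  simp only [List.mem_flatMap, List.mem_map, List.mem_range, hr, or_false]
  constructor
  · rintro ⟨w, hw, i, hi, rfl⟩
    exact ⟨w.toList, ⟨w, hw, rfl⟩, List.take_prefix i _⟩
  · rintro ⟨_, ⟨w, hw, rfl⟩, hpre⟩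
    refine ⟨w, hw, r.length, ?_, (List.prefix_iff_eq_take.mp hpre).symm⟩
    have := hpre.length_le
    omega

-- parser facts
theorem goodPat_tail {c : Char} {r : List Char} (h : goodPat (c :: r) = true) :
    goodPat r = true := by
  simp only [goodPat, Bool.and_eq_true] at h
  exact h.2

theorem goodPat_drop {l : List Char} (h : goodPat l = true) (k : Nat) :
    goodPat (l.drop k) = true := by
  induction k generalizing l with
  | zero => simpa using h
  | succ k ih =>
    cases l with
    | nil => simpa using h
    | cons c r => exact ih (goodPat_tail h)

theorem parse_of_goodPat : ∀ (l : List Char), goodPat l = true →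
    ∃ toks, parsePattern l = some toks := by
  intro l
  induction l using parsePattern.induct with
  | case1 => intro _; exact ⟨[], by simp [parsePattern]⟩
  | case2 rest hidx =>
    intro hg
    exfalso
    simp only [goodPat, Bool.and_eq_true, Bool.or_eq_true] at hg
    have hmem : (')' : Char) ∈ rest := by
      have h1 := hg.1
      rcases h1 with h1 | h1
      · simp at h1
      · simpa using h1
    exact ((PySem.List.index?_eq_none_iff _ _).mp hidx) hmem
  | case3 rest j hidx hnone ih =>
    intro hg
    exfalso
    have hg2 : goodPat (rest.drop (j + 1)) = true := goodPat_drop (goodPat_tail hg) (j + 1)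
    obtain ⟨ts, hts⟩ := ih hg2
    rw [hts] at hnone; cases hnone
  | case4 rest j hidx ts hts ih =>
    intro _
    have hidx' : List.idxOf? ')' rest = some j := by
      rw [← PySem.List.index?_eq_idxOf?]; exact hidx
    exact ⟨rest.take j :: ts, by simp [parsePattern, hidx', hts]⟩
  | case5 c rest hc hnone ih =>
    intro hg
    exfalso
    obtain ⟨ts, hts⟩ := ih (goodPat_tail hg)
    rw [hts] at hnone; cases hnone
  | case6 c rest hc ts hts ih =>
    intro _
    exact ⟨[c] :: ts, by simp [parsePattern, hc, hts]⟩

-- per-pattern agreement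
theorem per_pattern (lang : List String) (toks : List (List Char)) :
    loopA [(toks, prefixTree lang)] 0 =
      ((toks.foldl (stepB (prefsOf lang)) [[]]).length : Int) := by
  have hws : prefixTree lang = trieOfC (lang.map String.toList) := by
    rw [prefixTree, trieOfC, List.foldl_map]
  rw [loopA_eq]
  simp only [List.map_cons, List.map_nil, List.sum_cons, List.sum_nil, add_zero, zero_add]
  rw [hws]
  refine (keyL (prefsOf lang) toks [] (lang.map String.toList) ?_).symm
  intro r hr
  simpa using mem_prefsOf lang r hr

-- ===== VERDICT (by name: the statement is the Claim_ definition above) =====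
theorem solve_spec : Claim_equal_solve := by
  intro lang pats _hdom hpre
  unfold Spec_solve
  show solve lang pats = solve_alt lang pats
  unfold solve solve_alt
  apply List.map_congr_left
  intro pat hpat
  obtain ⟨toks, hp⟩ := parse_of_goodPat _ (hpre pat hpat)
  rw [hp]
  exact per_pattern lang toks
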